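-- pv_equiv track=rewrite | github.com/anurag9601/brocode_challenge | 22_dec.py | shift_letters
-- ===== SOURCE A (Python) =====
-- def shift_letters(s, n):
--     lst_s = [*s]
--     length_count = 0
--     while(length_count != len(s)):
--         if(s[length_count] != " "):
--             insert_value = s[length_count]
--             current_i_count = length_count
--             shift_count = 0
--             while(shift_count != n):
--                 if(current_i_count == len(s)-1):
--                     current_i_count = 0
--                 else:
--                     current_i_count += 1
--                 if(s[current_i_count] != " "):
--                     shift_count += 1
--             lst_s[current_i_count] = insert_value
--             length_count += 1
--         elif(s[length_count] == " "):
--             length_count += 1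
--
--     return "".join(lst_s)
-- ===== SOURCE B (Python) =====
-- def shift_letters(s, n):
--     positions = [i for i, c in enumerate(s) if c != ' ']
--     m = len(positions)
--     res = list(s)
--     if m != 0:
--         for k, p in enumerate(positions):
--             res[positions[(k + n) % m]] = s[p]
--     return "".join(res)
-- ===== Notes on version B (the rewrite author's own statement) =====
-- stated objective: faster
-- what changed: Replaced the per-character inner while-loop that walks the string n non-space steps by a one-pass precomputation of the non-space positions list, mapping position k to positions[(k+n) % m] with modular arithmetic.
import Mathlib
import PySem

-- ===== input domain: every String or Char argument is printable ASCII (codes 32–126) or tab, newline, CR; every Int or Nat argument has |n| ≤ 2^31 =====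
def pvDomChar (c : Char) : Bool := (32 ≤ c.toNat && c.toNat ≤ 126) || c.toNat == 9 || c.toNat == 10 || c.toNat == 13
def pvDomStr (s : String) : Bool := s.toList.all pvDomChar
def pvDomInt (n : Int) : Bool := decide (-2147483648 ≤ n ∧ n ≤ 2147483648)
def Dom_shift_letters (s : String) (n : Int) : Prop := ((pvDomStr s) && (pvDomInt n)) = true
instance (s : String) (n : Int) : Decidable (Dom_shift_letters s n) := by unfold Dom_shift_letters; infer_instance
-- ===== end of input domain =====

-- B replaces A's per-character walk of n non-space steps by a precomputed list of non-space
-- positions and modular index arithmetic (objective: faster).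

-- ===== PORT A =====
-- A's inner while loop: advance current_i_count cyclically until shift_count reaches n.
-- The fuel argument only makes the recursion total; whenever 0 ≤ n (or s is all spaces, in
-- which case the loop is never entered) the fuel given below is never exhausted (proved below).
def pvShiftWalk (l : List Char) (n : Int) : Nat → Nat → Nat → Nat
  | 0, c, _ => c
  | f+1, c, sh =>
    if (sh : Int) = n then c
    else
      let c' := if c = l.length - 1 then 0 else c + 1
      if l.getD c' ' ' ≠ ' ' then pvShiftWalk l n f c' (sh+1)
      else pvShiftWalk l n f c' sh

-- indices length_count and current_i_count always lie in [0, len s), so s[i] is l.getD i ' ' exactly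
def shift_letters (s : String) (n : Int) : String :=
  let l := s.toList
  let lst := (List.range l.length).foldl (fun lst i =>
    if l.getD i ' ' ≠ ' ' then
      lst.set (pvShiftWalk l n ((n.toNat + 1) * (l.length + 1)) i 0) (l.getD i ' ')
    else lst) l
  String.ofList lst

-- ===== PORT B =====
-- positions[(k+n) % m] is a nonnegative in-range index, so list indexing is pyGetD / List.set exactly
def shift_letters_alt (s : String) (n : Int) : String :=
  let l := s.toList
  let positions := (PySem.List.enumerate l 0).filterMap
    (fun ic => if ic.2 ≠ ' ' then some ic.1 else none)
  let m := positions.length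
  let res := l
  let res := if m ≠ 0 then
      (PySem.List.enumerate positions 0).foldl (fun res kp =>
        res.set (PySem.List.pyGetD positions (PySem.Int.mod (kp.1 + n) (m : Int)) 0).toNat
                (PySem.List.pyGetD l kp.2 ' ')) res
    else res
  String.ofList res

-- ===== PRECONDITION & SPEC =====
-- Pre_ excludes n < 0 when s contains a non-space character: there A's inner while loop counts
-- shift_count upward from 0 and never equals the negative n, so A never returns (infinite loop).
def Pre_shift_letters (s : String) (n : Int) : Prop := 0 ≤ n ∨ ∀ c ∈ s.toList, c = ' '
instance (s : String) (n : Int) : Decidable (Pre_shift_letters s n) := by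
  unfold Pre_shift_letters; infer_instance

def pvWitness_shift_letters : String × Int := ("ab c", 2)

def Spec_shift_letters (s : String) (n : Int) (out : String) : Prop := out = shift_letters_alt s n
instance (s : String) (n : Int) (out : String) : Decidable (Spec_shift_letters s n out) := by
  unfold Spec_shift_letters; infer_instance

-- ===== CLAIM (what is proved, stated in full; the proofs are below) =====
def Claim_equal_shift_letters : Prop := ∀ (s : String) (n : Int), Dom_shift_letters s n →
  Pre_shift_letters s n → Spec_shift_letters s n (shift_letters s n)

-- ===== LEMMAS AND PROOFS =====


def pvPos (l : List Char) : List Nat :=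
  (List.range l.length).filter (fun i => decide (l.getD i ' ' ≠ ' '))

lemma pvPos_mem (l : List Char) (i : Nat) :
    i ∈ pvPos l ↔ i < l.length ∧ l.getD i ' ' ≠ ' ' := by
  simp [pvPos, List.mem_filter, List.mem_range]

lemma pvPos_pairwise (l : List Char) : (pvPos l).Pairwise (· < ·) := by
  exact List.Pairwise.filter _ (List.pairwise_lt_range)

def pvAdvO (l : List Char) (N : Nat) : Nat → Nat → Nat → Option Nat
  | 0, _, _ => none
  | f+1, c, sh =>
    if sh = N then some c
    else
      let c' := (c + 1) % l.length
      if l.getD c' ' ' ≠ ' ' then pvAdvO l N f c' (sh+1) else pvAdvO l N f c' sh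

lemma pvGapSpec (l : List Char) (k : Nat) (hk : k < (pvPos l).length) :
    ∃ g, 1 ≤ g ∧ g ≤ l.length ∧
      ((pvPos l).getD k 0 + g) % l.length = (pvPos l).getD ((k+1) % (pvPos l).length) 0 ∧
      ∀ t, 1 ≤ t → t < g → ¬ (l.getD (((pvPos l).getD k 0 + t) % l.length) ' ' ≠ ' ') := by
  set P := pvPos l with hP
  set m := P.length with hm
  have hget : ∀ (j : Nat) (hj : j < m), P.getD j 0 = P[j]'hj := by
    intro j hj; exact List.getD_eq_getElem P 0 hj
  have hmono : ∀ (a b : Nat) (ha : a < m) (hb : b < m), a < b → P[a] < P[b] := by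
    intro a b ha hb hab
    exact (List.pairwise_iff_getElem.mp (pvPos_pairwise l)) a b ha hb hab
  have hbound : ∀ (j : Nat) (hj : j < m), P[j] < l.length ∧ l.getD P[j] ' ' ≠ ' ' := by
    intro j hj
    exact (pvPos_mem l _).mp (List.getElem_mem hj)
  have hidx : ∀ (x : Nat), x < l.length → l.getD x ' ' ≠ ' ' → ∃ (k' : Nat) (h : k' < m), P[k'] = x := by
    intro x h1 h2
    have : x ∈ P := (pvPos_mem l x).mpr ⟨h1, h2⟩
    exact List.mem_iff_getElem.mp this
  have hlen : 0 < l.length := lt_of_le_of_lt (Nat.zero_le _) (hbound k hk).1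
  by_cases hk1 : k + 1 < m
  · -- next position within the list
    refine ⟨P[k+1] - P[k], ?_, ?_, ?_, ?_⟩
    · have := hmono k (k+1) hk hk1 (by omega); omega
    · have := (hbound (k+1) hk1).1; omega
    · have h1 := hmono k (k+1) hk hk1 (by omega)
      have h2 := (hbound (k+1) hk1).1
      rw [hget k hk, show (k+1) % m = k+1 from Nat.mod_eq_of_lt hk1, hget (k+1) hk1,
        show P[k] + (P[k+1]'hk1 - P[k]) = P[k+1]'hk1 from by omega, Nat.mod_eq_of_lt h2]
    · intro t ht1 ht2 hns
      rw [hget k hk] at hns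
      have h1 := hmono k (k+1) hk hk1 (by omega)
      have h2 := (hbound (k+1) hk1).1
      rw [Nat.mod_eq_of_lt (by omega)] at hns
      obtain ⟨k', hk', hpk'⟩ := hidx _ (by omega) hns
      have c1 : ¬ (k' ≤ k) := by
        intro hle
        rcases Nat.lt_or_ge k' k with h | h
        · have := hmono k' k (by omega) hk h; omega
        · have : k' = k := by omega
          subst this; omega
      have c2 : ¬ (k + 1 ≤ k') := by
        intro hle
        rcases Nat.lt_or_ge (k+1) k' with h | h
        · have := hmono (k+1) k' hk1 hk' h; omega
        · have : k' = k + 1 := by omega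
          subst this; omega
      omega
  · -- wrap around to the first position
    have hkm : k + 1 = m := by omega
    have hm0 : (k+1) % m = 0 := by rw [hkm, Nat.mod_self]
    have hj0 : 0 < m := by omega
    have hle0 : P[0]'hj0 ≤ P[k] := by
      rcases Nat.eq_zero_or_pos k with h | h
      · subst h; omega
      · exact le_of_lt (hmono 0 k hj0 hk h)
    refine ⟨l.length - P[k] + P[0]'hj0, ?_, ?_, ?_, ?_⟩
    · have := (hbound k hk).1; omega
    · have := (hbound k hk).1; omega
    · rw [hget k hk, hm0, hget 0 hj0]
      have h1 := (hbound k hk).1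
      have h2 := (hbound 0 hj0).1
      have : P[k] + (l.length - P[k] + P[0]'hj0) = l.length + P[0]'hj0 := by omega
      rw [this, Nat.add_mod_left, Nat.mod_eq_of_lt h2]
    · intro t ht1 ht2 hns
      rw [hget k hk] at hns
      have h1 := (hbound k hk).1
      have h2 := (hbound 0 hj0).1
      rcases Nat.lt_or_ge (P[k] + t) l.length with h | h
      · rw [Nat.mod_eq_of_lt h] at hns
        obtain ⟨k', hk', hpk'⟩ := hidx _ h hns
        have : k' ≤ k := by omega
        rcases Nat.lt_or_ge k' k with hh | hh
        · have := hmono k' k (by omega) hk hh; omega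
        · have : k' = k := by omega
          subst this; omega
      · have heq : P[k] + t = l.length + (P[k] + t - l.length) := by omega
        rw [heq, Nat.add_mod_left, Nat.mod_eq_of_lt (by omega)] at hns
        obtain ⟨k', hk', hpk'⟩ := hidx _ (by omega) hns
        have hlt0 : P[k] + t - l.length < P[0]'hj0 := by omega
        rcases Nat.eq_zero_or_pos k' with hh | hh
        · subst hh; omega
        · have := hmono 0 k' hj0 hk' hh; omega


lemma pvWalk (l : List Char) (N : Nat) :
    ∀ (g : Nat), 1 ≤ g → ∀ (c sh f : Nat) (r : Nat), sh ≠ N → c < l.length →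
      (∀ t, 1 ≤ t → t < g → ¬ (l.getD ((c + t) % l.length) ' ' ≠ ' ')) →
      (l.getD ((c + g) % l.length) ' ' ≠ ' ') →
      pvAdvO l N f ((c + g) % l.length) (sh+1) = some r →
      pvAdvO l N (g + f) c sh = some r := by
  intro g
  induction g with
  | zero => omega
  | succ g ih =>
    intro _ c sh f r hsh hc hmid hns h
    by_cases hg : g = 0
    · subst hg
      have : 1 + f = f + 1 := by omega
      rw [this, pvAdvO, if_neg hsh]
      simp only [if_pos hns]
      exact h
    · -- first step lands on a space
      have hsp1 : ¬ (l.getD ((c + 1) % l.length) ' ' ≠ ' ') := hmid 1 le_rfl (by omega)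
      have : g + 1 + f = (g + f) + 1 := by omega
      rw [this, pvAdvO, if_neg hsh]
      simp only [if_neg hsp1]
      have hstep : ∀ t, ((c + 1) % l.length + t) % l.length = (c + (t + 1)) % l.length := by
        intro t
        rw [Nat.mod_add_mod]
        congr 1
        omega
      apply ih (by omega) _ sh f r hsh (Nat.mod_lt _ (by omega))
      · intro t ht1 htg
        rw [hstep]
        exact hmid (t+1) (by omega) (by omega)
      · rw [hstep]
        have : g + 1 = g + 1 := rfl
        exact hns
      · rw [hstep]
        exact h



lemma pvAdvO_eq (l : List Char) (N : Nat) :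
    ∀ (f c sh : Nat) (r : Nat), c < l.length → pvAdvO l N f c sh = some r →
      pvShiftWalk l (N : Int) f c sh = r := by
  intro f
  induction f with
  | zero => intro c sh r _ h; simp [pvAdvO] at h
  | succ f ih =>
    intro c sh r hc h
    rw [pvAdvO] at h
    rw [pvShiftWalk]
    by_cases hsh : sh = N
    · simp [hsh] at h ⊢; omega
    · have hsh' : ¬ ((sh : Int) = (N : Int)) := by exact_mod_cast hsh
      simp only [if_neg hsh] at h
      simp only [if_neg hsh']
      have hstep : (if c = l.length - 1 then 0 else c + 1) = (c + 1) % l.length := by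
        by_cases hcl : c = l.length - 1
        · rw [if_pos hcl, hcl]
          have hl1 : l.length - 1 + 1 = l.length := by omega
          rw [hl1, Nat.mod_self]
        · rw [if_neg hcl, Nat.mod_eq_of_lt (by omega)]
      rw [hstep]
      have hlt : (c + 1) % l.length < l.length := Nat.mod_lt _ (by omega)
      by_cases hns : l.getD ((c + 1) % l.length) ' ' ≠ ' '
      · simp only [if_pos hns] at h ⊢; exact ih _ _ _ hlt h
      · simp only [if_neg hns] at h ⊢; exact ih _ _ _ hlt h

lemma pvAdvO_mono (l : List Char) (N : Nat) :
    ∀ (f f' c sh : Nat) (r : Nat), pvAdvO l N f c sh = some r → f ≤ f' →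
      pvAdvO l N f' c sh = some r := by
  intro f
  induction f with
  | zero => intro f' c sh r h; simp [pvAdvO] at h
  | succ f ih =>
    intro f' c sh r h hle
    obtain ⟨f'', rfl⟩ : ∃ f'', f' = f'' + 1 := ⟨f' - 1, by omega⟩
    rw [pvAdvO] at h ⊢
    by_cases hsh : sh = N
    · simp [hsh] at h ⊢; exact h
    · simp only [if_neg hsh] at h ⊢
      by_cases hns : l.getD ((c + 1) % l.length) ' ' ≠ ' '
      · simp only [if_pos hns] at h ⊢; exact ih _ _ _ _ h (by omega)
      · simp only [if_neg hns] at h ⊢; exact ih _ _ _ _ h (by omega)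

lemma pvRangeMapGetD (P : List Nat) :
    (List.range P.length).map (fun k => P.getD k 0) = P := by
  apply List.ext_getElem
  · simp
  · intro i h1 h2
    simp [List.getD_eq_getElem?_getD, List.getElem?_eq_getElem h2]

lemma pvPos_getD_mem (l : List Char) (k : Nat) (hk : k < (pvPos l).length) :
    (pvPos l).getD k 0 ∈ pvPos l := by
  rw [List.getD_eq_getElem _ 0 hk]; exact List.getElem_mem hk

lemma pvHop (l : List Char) (N : Nat) (k sh f : Nat) (r : Nat)
    (hk : k < (pvPos l).length) (hsh : sh ≠ N)
    (h : pvAdvO l N f ((pvPos l).getD ((k+1) % (pvPos l).length) 0) (sh+1) = some r) :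
    pvAdvO l N (l.length + f) ((pvPos l).getD k 0) sh = some r := by
  obtain ⟨g, hg1, hgl, hgeq, hmid⟩ := pvGapSpec l k hk
  have hc : (pvPos l).getD k 0 < l.length :=
    ((pvPos_mem l _).mp (pvPos_getD_mem l k hk)).1
  have hns : l.getD (((pvPos l).getD k 0 + g) % l.length) ' ' ≠ ' ' := by
    rw [hgeq]
    exact ((pvPos_mem l _).mp (pvPos_getD_mem l _ (Nat.mod_lt _ (by omega)))).2
  have hw := pvWalk l N g hg1 _ sh f r hsh hc hmid hns (by rw [hgeq]; exact h)
  exact pvAdvO_mono l N (g + f) (l.length + f) _ _ _ hw (by omega)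

lemma pvIter (l : List Char) (N : Nat) :
    ∀ (j k sh : Nat), k < (pvPos l).length → sh + j = N →
      pvAdvO l N (j * l.length + 1) ((pvPos l).getD k 0) sh =
        some ((pvPos l).getD ((k + j) % (pvPos l).length) 0) := by
  intro j
  induction j with
  | zero =>
    intro k sh hk hsh
    rw [show (k + 0) % (pvPos l).length = k from by rw [Nat.add_zero, Nat.mod_eq_of_lt hk]]
    rw [show 0 * l.length + 1 = 1 from by omega, pvAdvO, if_pos (by omega)]
  | succ j ih =>
    intro k sh hk hsh
    have hm : 0 < (pvPos l).length := by omega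
    have hk' : (k + 1) % (pvPos l).length < (pvPos l).length := Nat.mod_lt _ (by omega)
    have hih := ih ((k + 1) % (pvPos l).length) (sh + 1) hk' (by omega)
    have hidx : ((k + 1) % (pvPos l).length + j) % (pvPos l).length
        = (k + (j + 1)) % (pvPos l).length := by
      rw [Nat.mod_add_mod]; congr 1; omega
    rw [hidx] at hih
    have := pvHop l N k sh (j * l.length + 1) _ hk (by omega) hih
    rw [show (j + 1) * l.length + 1 = l.length + (j * l.length + 1) from by ring] at *
    exact this

lemma pvMain (l : List Char) (n : Int) (k : Nat) (hn : 0 ≤ n) (hk : k < (pvPos l).length) :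
    pvShiftWalk l n ((n.toNat + 1) * (l.length + 1)) ((pvPos l).getD k 0) 0 =
      (pvPos l).getD ((k + n.toNat) % (pvPos l).length) 0 := by
  have hi := pvIter l n.toNat n.toNat k 0 hk (by omega)
  have hfuel : n.toNat * l.length + 1 ≤ (n.toNat + 1) * (l.length + 1) := by
    have : (n.toNat + 1) * (l.length + 1) = n.toNat * l.length + (n.toNat + l.length + 1) := by
      ring
    omega
  have hmono := pvAdvO_mono l n.toNat _ _ _ _ _ hi hfuel
  have hc : (pvPos l).getD k 0 < l.length :=
    ((pvPos_mem l _).mp (pvPos_getD_mem l k hk)).1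
  have := pvAdvO_eq l n.toNat _ _ _ _ hc hmono
  rwa [Int.toNat_of_nonneg hn] at this


lemma pvFilterMapIf (xs : List Nat) (p : Nat → Prop) [DecidablePred p] (f : Nat → Int) :
    (xs.filterMap fun k => if p k then some (f k) else none)
      = (xs.filter (fun k => decide (p k))).map f := by
  induction xs with
  | nil => rfl
  | cons a xs ih =>
    by_cases h : p a <;> simp [h, ih]

lemma pvPosB (l : List Char) :
    (PySem.List.enumerate l 0).filterMap (fun ic => if ic.2 ≠ ' ' then some ic.1 else none) =
      (pvPos l).map (Nat.cast : Nat → Int) := by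
  rw [PySem.List.enumerate_eq_map_pyRange l ' ', List.filterMap_map]
  rw [show PySem.List.len l = (l.length : Int) from PySem.List.len_eq l]
  rw [PySem.List.pyRange_one, List.filterMap_map]
  conv_lhs => simp only [Function.comp, Int.sub_zero, Int.toNat_natCast, zero_add,
    PySem.List.pyGetD_natCast]
  rw [pvFilterMapIf (List.range l.length) (fun k => l.getD k ' ' ≠ ' ') (fun k => (k : Int))]
  rfl

-- ===== VERDICT (by name: the statement is the Claim_ definition above) =====
theorem shift_letters_spec : Claim_equal_shift_letters := by
  intro s n _ hpre
  simp only [Spec_shift_letters, shift_letters, shift_letters_alt]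
  rw [pvPosB]
  set l := s.toList with hl
  have hfil : (List.range l.length).filter (fun i => decide (l.getD i ' ' ≠ ' ')) = pvPos l := rfl
  by_cases hm : (pvPos l).length = 0
  · -- no non-space character: both sides leave the list unchanged
    rw [PySem.List.foldl_ite_eq_foldl_filter (fun i => l.getD i ' ' ≠ ' ')
      (fun (lst : List Char) (i : Nat) => lst.set (pvShiftWalk l n ((n.toNat + 1) * (l.length + 1)) i 0) (l.getD i ' '))]
    rw [hfil, List.length_eq_zero_iff.mp hm]
    simp
  · -- at least one non-space character; Pre_ then gives 0 ≤ n
    have hm0 : 0 < (pvPos l).length := Nat.pos_of_ne_zero hm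
    have hn : 0 ≤ n := by
      rcases hpre with hn | hsp
      · exact hn
      · exfalso
        have hmem : (pvPos l).getD 0 0 ∈ pvPos l := pvPos_getD_mem l 0 hm0
        obtain ⟨hlt, hns⟩ := (pvPos_mem l _).mp hmem
        exact hns (hsp _ (by rw [List.getD_eq_getElem _ _ hlt]; exact List.getElem_mem hlt))
    conv_lhs =>
      rw [PySem.List.foldl_ite_eq_foldl_filter (fun i => l.getD i ' ' ≠ ' ')
        (fun (lst : List Char) (i : Nat) => lst.set (pvShiftWalk l n ((n.toNat + 1) * (l.length + 1)) i 0) (l.getD i ' '))]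
      rw [hfil, ← pvRangeMapGetD (pvPos l), List.foldl_map]
    conv_rhs =>
      rw [if_pos (by simp [hm])]
      rw [PySem.List.enumerate_eq_map_pyRange ((pvPos l).map (Nat.cast : Nat → Int)) 0,
        List.foldl_map, PySem.List.len_eq, PySem.List.pyRange_one]
      simp only [Int.sub_zero, Int.toNat_natCast, List.length_map, zero_add]
      rw [List.foldl_map]
    congr 1
    apply PySem.List.foldl_congr_mem
    intro acc k hkmem
    have hk : k < (pvPos l).length := List.mem_range.mp hkmem
    have e1 : PySem.List.pyGetD ((pvPos l).map (Nat.cast : Nat → Int)) (k : Int) 0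
        = (((pvPos l).getD k 0 : Nat) : Int) := by
      rw [PySem.List.pyGetD_natCast,
        List.getD_eq_getElem _ _ (by rw [List.length_map]; exact hk),
        List.getElem_map, List.getD_eq_getElem _ _ hk]
    have hk2 : (k + n.toNat) % (pvPos l).length < (pvPos l).length := Nat.mod_lt _ hm0
    have emod : PySem.Int.mod ((k : Int) + n) (((pvPos l).length : Nat) : Int)
        = (((k + n.toNat) % (pvPos l).length : Nat) : Int) := by
      rw [PySem.Int.mod_eq_emod_of_pos (by exact_mod_cast hm0)]
      rw [show (k : Int) + n = ((k + n.toNat : Nat) : Int) from by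
        push_cast [Int.toNat_of_nonneg hn]; ring]
      exact_mod_cast (Int.natCast_mod (k + n.toNat) (pvPos l).length).symm
    have e2 : (PySem.List.pyGetD ((pvPos l).map (Nat.cast : Nat → Int))
        (PySem.Int.mod ((k : Int) + n) (((pvPos l).length : Nat) : Int)) 0).toNat
        = (pvPos l).getD ((k + n.toNat) % (pvPos l).length) 0 := by
      rw [emod, PySem.List.pyGetD_natCast,
        List.getD_eq_getElem _ _ (by rw [List.length_map]; exact hk2),
        List.getElem_map, List.getD_eq_getElem _ _ hk2, Int.toNat_natCast]
    simp only [e1, e2, PySem.List.pyGetD_natCast,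
      pvMain l n k hn hk]
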